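-- pv_equiv track=rewrite | github.com/jamescockburn47/SC-Gen-3 | performance_utils.py | chunk_text_efficiently
-- ===== SOURCE A (Python) =====
-- def chunk_text_efficiently(text: str, chunk_size: int = 100000, overlap: int = 1000) -> list:
--     """Efficiently chunk large text with overlap."""
--     if len(text) <= chunk_size:
--         return [text]
--
--     chunks = []
--     start = 0
--
--     while start < len(text):
--         end = start + chunk_size
--
--         # Adjust end to avoid breaking words
--         if end < len(text):
--             # Find the last space before the end
--             while end > start and text[end] not in ' \n\t':
--                 end -= 1
--
--             if end == start:  # No space found, use original end
--                 end = start + chunk_size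
--
--         chunk = text[start:end]
--         chunks.append(chunk)
--
--         # Move start forward, accounting for overlap
--         start = max(end - overlap, start + 1)
--
--         if start >= len(text):
--             break
--
--     return chunks
-- ===== SOURCE B (Python) =====
-- def _bisect_right(a, x):
--     # rightmost insertion point in sorted a (CPython bisect_right loop)
--     lo, hi = 0, len(a)
--     while lo < hi:
--         mid = (lo + hi) // 2
--         if x < a[mid]:
--             hi = mid
--         else:
--             lo = mid + 1
--     return lo
--
--
-- def chunk_text_efficiently(text: str, chunk_size: int = 100000, overlap: int = 1000) -> list:
--     """Chunk large text with overlap, word-aligned via a precomputed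
--     sorted index of whitespace positions and binary search."""
--     n = len(text)
--     if n <= chunk_size:
--         return [text]
--
--     ws = [i for i, c in enumerate(text) if c in ' \n\t']
--
--     chunks = []
--     start = 0
--     while start < n:
--         end = start + chunk_size
--         if end < n:
--             r = _bisect_right(ws, end)
--             if r > 0 and ws[r - 1] > start:
--                 end = ws[r - 1]
--         chunks.append(text[start:end])
--         start = max(end - overlap, start + 1)
--     return chunks
-- ===== Notes on version B (the rewrite author's own statement) =====
-- stated objective: alternative
-- what changed: A finds each chunk's word boundary by scanning characters backwards from start+chunk_size; B precomputes a sorted list of all whitespace positions once and finds the boundary of every chunk by binary search (bisect_right) into that list, with the same fallback and advance rules.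
import Mathlib
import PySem

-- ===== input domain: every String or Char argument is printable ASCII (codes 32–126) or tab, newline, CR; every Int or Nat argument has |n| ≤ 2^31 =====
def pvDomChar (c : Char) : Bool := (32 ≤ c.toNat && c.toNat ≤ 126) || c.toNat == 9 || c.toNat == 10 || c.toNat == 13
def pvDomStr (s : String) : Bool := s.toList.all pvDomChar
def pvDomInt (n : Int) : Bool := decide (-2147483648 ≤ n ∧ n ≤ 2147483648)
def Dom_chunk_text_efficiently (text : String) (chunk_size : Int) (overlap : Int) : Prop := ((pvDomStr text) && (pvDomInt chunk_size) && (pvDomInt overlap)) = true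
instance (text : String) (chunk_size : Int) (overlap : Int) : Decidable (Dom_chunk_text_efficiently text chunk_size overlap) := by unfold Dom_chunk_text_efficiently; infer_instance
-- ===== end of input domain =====

-- B replaces A's per-chunk backward character scan with a precomputed sorted list of
-- whitespace positions queried by binary search (alternative word-boundary lookup, same results).

-- shared character class: Python's `c in ' \n\t'`
def pvIsWS (c : Char) : Bool := c == ' ' || c == '\n' || c == '\t'

-- ===== PORT A =====
-- `while end > start and text[end] not in ' \n\t': end -= 1`
-- (text[end] is always in range when this runs: 0 ≤ start < end < len(text); getD is exact there)
-- fuel = (e - start).toNat bounds the iterations exactly (e steps down towards start)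
def pvScanBack (cs : List Char) (start : Int) (e : Int) : Nat → Int
  | 0 => e
  | fuel + 1 =>
    if start < e ∧ ¬ pvIsWS (cs.getD e.toNat ' ') then pvScanBack cs start (e - 1) fuel else e

-- A's per-iteration computation of the local variable `end`
def pvEndA (cs : List Char) (chunk_size start : Int) : Int :=
  if start + chunk_size < (cs.length : Int) then
    (if pvScanBack cs start (start + chunk_size) chunk_size.toNat = start then start + chunk_size
     else pvScanBack cs start (start + chunk_size) chunk_size.toNat)
  else start + chunk_size

-- the `while start < len(text)` loop; fuel = len(text)+1 suffices since start grows by ≥ 1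
def pvLoopA (cs : List Char) (chunk_size overlap : Int) (start : Int) : Nat → List String
  | 0 => []
  | fuel + 1 =>
    if start < (cs.length : Int) then
      String.ofList (PySem.List.slice cs (some start) (some (pvEndA cs chunk_size start))) ::
        pvLoopA cs chunk_size overlap
          (max (pvEndA cs chunk_size start - overlap) (start + 1)) fuel
    else []

def chunk_text_efficiently (text : String) (chunk_size : Int) (overlap : Int) : List String :=
  let cs := text.toList
  if (cs.length : Int) ≤ chunk_size then [text]
  else pvLoopA cs chunk_size overlap 0 (cs.length + 1)

-- ===== PORT B =====
-- `ws = [i for i, c in enumerate(text) if c in ' \n\t']`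
def pvWsPositions (cs : List Char) : List Int :=
  (PySem.List.enumerate cs).filterMap (fun ic => if pvIsWS ic.2 then some ic.1 else none)

-- B's per-iteration `end`: Source B's hand-rolled `_bisect_right` is the CPython bisect_right
-- lo/hi/mid loop, ported step for step as PySem.List.bisectRight (the same recursion);
-- `ws[r-1]` is always in range when r > 0, so getD is exact there.
def pvEndB (cs : List Char) (ws : List Int) (chunk_size start : Int) : Int :=
  if start + chunk_size < (cs.length : Int) then
    (if 0 < PySem.List.bisectRight ws (start + chunk_size) ∧
        start < ws.getD (PySem.List.bisectRight ws (start + chunk_size) - 1) 0 then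
       ws.getD (PySem.List.bisectRight ws (start + chunk_size) - 1) 0
     else start + chunk_size)
  else start + chunk_size

def pvLoopB (cs : List Char) (ws : List Int) (chunk_size overlap : Int) (start : Int) : Nat → List String
  | 0 => []
  | fuel + 1 =>
    if start < (cs.length : Int) then
      String.ofList (PySem.List.slice cs (some start) (some (pvEndB cs ws chunk_size start))) ::
        pvLoopB cs ws chunk_size overlap
          (max (pvEndB cs ws chunk_size start - overlap) (start + 1)) fuel
    else []

def chunk_text_efficiently_alt (text : String) (chunk_size : Int) (overlap : Int) : List String :=
  let cs := text.toList
  if (cs.length : Int) ≤ chunk_size then [text]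
  else pvLoopB cs (pvWsPositions cs) chunk_size overlap 0 (cs.length + 1)

-- ===== PRECONDITION & SPEC =====
def Spec_chunk_text_efficiently (text : String) (chunk_size : Int) (overlap : Int) (out : List String) : Prop := out = chunk_text_efficiently_alt text chunk_size overlap
instance (text : String) (chunk_size : Int) (overlap : Int) (out : List String) : Decidable (Spec_chunk_text_efficiently text chunk_size overlap out) := by unfold Spec_chunk_text_efficiently; infer_instance

-- ===== CLAIM (what is proved, stated in full; the proofs are below) =====
def Claim_equal_chunk_text_efficiently : Prop := ∀ (text : String) (chunk_size : Int) (overlap : Int), Dom_chunk_text_efficiently text chunk_size overlap → Spec_chunk_text_efficiently text chunk_size overlap (chunk_text_efficiently text chunk_size overlap)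

-- ===== LEMMAS AND PROOFS =====

lemma mem_pvWsPositions {cs : List Char} {p : Int} :
    p ∈ pvWsPositions cs ↔ ∃ (k : Nat) (hk : k < cs.length), p = (k : Int) ∧ pvIsWS cs[k] := by
  unfold pvWsPositions
  simp only [List.mem_filterMap, PySem.List.mem_enumerate_iff]
  constructor
  · rintro ⟨⟨i, c⟩, ⟨k, hk, heq⟩, hf⟩
    cases heq
    by_cases h : pvIsWS cs[k] <;> simp [h] at hf
    exact ⟨k, hk, by simpa using hf.symm, h⟩
  · rintro ⟨k, hk, rfl, h⟩
    exact ⟨((k : Int), cs[k]), ⟨k, hk, by simp⟩, by simp [h]⟩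

lemma pairwise_lt_pvWsPositions (cs : List Char) : (pvWsPositions cs).Pairwise (· < ·) := by
  unfold pvWsPositions
  rw [List.pairwise_filterMap]
  refine (PySem.List.pairwise_lt_enumerate cs 0).imp ?_
  intro a b hab x hx y hy
  split at hx <;> split at hy <;> simp_all

-- What the backward scan returns: either it is stuck at `start`, or it is the LARGEST
-- whitespace position in (start, e]; the second conjunct is the maximality.
lemma pvScanBack_char (cs : List Char) (start : Int) (fuel : Nat) :
    ∀ (e : Int), start ≤ e → (e - start).toNat ≤ fuel →
    (pvScanBack cs start e fuel = start ∨
      (start < pvScanBack cs start e fuel ∧ pvScanBack cs start e fuel ≤ e ∧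
        pvIsWS (cs.getD (pvScanBack cs start e fuel).toNat ' '))) ∧
    ∀ p : Int, start < p → p ≤ e → pvIsWS (cs.getD p.toNat ' ') → p ≤ pvScanBack cs start e fuel := by
  induction fuel with
  | zero =>
    intro e hse hf
    have : e = start := by omega
    subst this
    exact ⟨Or.inl rfl, fun p hp1 hp2 _ => by omega⟩
  | succ fuel ih =>
    intro e hse hf
    rw [pvScanBack]
    by_cases h : start < e ∧ ¬ pvIsWS (cs.getD e.toNat ' ')
    · rw [if_pos h]
      obtain ⟨hlt, hnw⟩ := h
      have := ih (e - 1) (by omega) (by omega)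
      refine ⟨?_, ?_⟩
      · rcases this.1 with h1 | h1
        · exact Or.inl h1
        · exact Or.inr ⟨h1.1, by omega, h1.2.2⟩
      · intro p hp1 hp2 hpw
        rcases eq_or_lt_of_le hp2 with rfl | hlt2
        · exact absurd hpw hnw
        · exact this.2 p hp1 (by omega) hpw
    · rw [if_neg h]
      rcases eq_or_lt_of_le hse with rfl | hlt
      · exact ⟨Or.inl rfl, fun p hp1 hp2 _ => by omega⟩
      · have hw : pvIsWS (cs.getD e.toNat ' ') := by
          by_contra hc
          exact h ⟨hlt, hc⟩
        exact ⟨Or.inr ⟨hlt, le_rfl, hw⟩, fun p _ hp2 _ => hp2⟩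

-- core: A's adjusted `end` equals B's bisect-found `end` (the case start+chunk_size < len)
lemma pvEnd_core (cs : List Char) (start e0 : Int)
    (h0 : 0 ≤ start) (he : e0 < (cs.length : Int)) :
    (if pvScanBack cs start e0 (e0 - start).toNat = start then e0 else pvScanBack cs start e0 (e0 - start).toNat)
    = (if 0 < PySem.List.bisectRight (pvWsPositions cs) e0 ∧
          start < (pvWsPositions cs).getD (PySem.List.bisectRight (pvWsPositions cs) e0 - 1) 0 then
         (pvWsPositions cs).getD (PySem.List.bisectRight (pvWsPositions cs) e0 - 1) 0
       else e0) := by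
  set ws := pvWsPositions cs with hws
  set r := PySem.List.bisectRight ws e0 with hr
  have hsorted := pairwise_lt_pvWsPositions cs
  have hspec := PySem.List.bisectRight_spec ws e0 (hsorted.imp (fun h => le_of_lt h))
  obtain ⟨hrlen, hle, hgt⟩ := hspec
  have hmono : ∀ (i j : Nat) (hi : i < ws.length) (hj : j < ws.length), i ≤ j → ws[i] ≤ ws[j] := by
    intro i j hi hj hij
    rcases eq_or_lt_of_le hij with rfl | h
    · exact le_rfl
    · exact le_of_lt ((List.pairwise_iff_getElem.mp hsorted) i j hi hj h)
  by_cases hcase : start < e0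
  · -- the scan really runs
    have hchar := pvScanBack_char cs start (e0 - start).toNat e0 (le_of_lt hcase) le_rfl
    set m := pvScanBack cs start e0 (e0 - start).toNat with hm
    rcases hchar.1 with hm1 | ⟨hm2a, hm2b, hm2c⟩
    · -- no whitespace in (start, e0]: A gives e0; B's condition must fail
      rw [if_pos hm1]
      by_cases hc : 0 < r ∧ start < ws.getD (r - 1) 0
      · exfalso
        obtain ⟨hr0, hgtst⟩ := hc
        have hr1 : r - 1 < ws.length := by omega
        have hgetd : ws.getD (r - 1) 0 = ws[r - 1] := List.getD_eq_getElem ws 0 hr1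
        have hmem : ws[r - 1] ∈ ws := List.getElem_mem hr1
        obtain ⟨k, hk, hpk, hkws⟩ := mem_pvWsPositions.mp hmem
        have hle' : ws[r - 1] ≤ e0 := hle (r - 1) hr1 (by omega)
        have : ws[r - 1] ≤ m := by
          apply hchar.2 _ (by rwa [hgetd] at hgtst) hle'
          rw [hpk]
          have hkk : ((k : Int)).toNat = k := Int.toNat_natCast k
          rw [hkk, List.getD_eq_getElem cs ' ' hk]
          exact hkws
        omega
      · rw [if_neg hc]
    · -- m is the largest whitespace position in (start, e0]; B finds the same one
      have hmne : m ≠ start := by omega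
      rw [if_neg hmne]
      have hmmem : m ∈ ws := by
        rw [hws, mem_pvWsPositions]
        refine ⟨m.toNat, by omega, by omega, ?_⟩
        exact (List.getD_eq_getElem cs ' ' (show m.toNat < cs.length by omega)) ▸ hm2c
      obtain ⟨i, hi, hiv⟩ := List.mem_iff_getElem.mp hmmem
      have hir : i < r := by
        by_contra hcon
        have := hgt i hi (by omega)
        omega
      have hr0 : 0 < r := by omega
      have hr1 : r - 1 < ws.length := by omega
      have hgetd : ws.getD (r - 1) 0 = ws[r - 1] := List.getD_eq_getElem ws 0 hr1
      have hmler : m ≤ ws[r - 1] := hiv ▸ hmono i (r - 1) hi hr1 (by omega)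
      have hrle : ws[r - 1] ≤ e0 := hle (r - 1) hr1 (by omega)
      obtain ⟨k, hk, hpk, hkws⟩ := mem_pvWsPositions.mp (List.getElem_mem hr1 : ws[r-1] ∈ ws)
      have hrlem : ws[r - 1] ≤ m := by
        apply hchar.2 _ (by omega) hrle
        rw [hpk]
        have hkk : ((k : Int)).toNat = k := Int.toNat_natCast k
        rw [hkk, List.getD_eq_getElem cs ' ' hk]
        exact hkws
      have : ws[r - 1] = m := le_antisymm hrlem hmler
      rw [if_pos ⟨hr0, by omega⟩, hgetd, this]
  · -- e0 ≤ start: scan is a no-op; both sides give e0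
    have hscan : pvScanBack cs start e0 (e0 - start).toNat = e0 := by
      have : (e0 - start).toNat = 0 := by omega
      rw [this, pvScanBack]
    rw [hscan]
    have hB : ¬ (0 < r ∧ start < ws.getD (r - 1) 0) := by
      rintro ⟨hr0, hgtst⟩
      have hr1 : r - 1 < ws.length := by omega
      have := hle (r - 1) hr1 (by omega)
      rw [List.getD_eq_getElem ws 0 hr1] at hgtst
      omega
    rw [if_neg hB]
    split <;> rfl

lemma pvEndA_eq_pvEndB (cs : List Char) (chunk_size start : Int) (h0 : 0 ≤ start) :
    pvEndA cs chunk_size start = pvEndB cs (pvWsPositions cs) chunk_size start := by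
  unfold pvEndA pvEndB
  have hfuel : chunk_size.toNat = (start + chunk_size - start).toNat := by omega
  split
  · rw [hfuel]
    exact pvEnd_core cs start (start + chunk_size) h0 (by assumption)
  · rfl

lemma pvLoop_eq (cs : List Char) (chunk_size overlap : Int) :
    ∀ (fuel : Nat) (start : Int), 0 ≤ start →
      pvLoopA cs chunk_size overlap start fuel
        = pvLoopB cs (pvWsPositions cs) chunk_size overlap start fuel := by
  intro fuel
  induction fuel with
  | zero => intro start _; rfl
  | succ fuel ih =>
    intro start h0
    rw [pvLoopA, pvLoopB]
    by_cases hs : start < (cs.length : Int)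
    · have h1 : (0:Int) ≤ max (pvEndB cs (pvWsPositions cs) chunk_size start - overlap) (start + 1) :=
        le_trans (by omega) (le_max_right _ _)
      rw [if_pos hs, if_pos hs, pvEndA_eq_pvEndB cs chunk_size start h0, ih _ h1]
    · rw [if_neg hs, if_neg hs]

-- ===== VERDICT (by name: the statement is the Claim_ definition above) =====
theorem chunk_text_efficiently_spec : Claim_equal_chunk_text_efficiently := by
  intro text chunk_size overlap _
  unfold Spec_chunk_text_efficiently chunk_text_efficiently chunk_text_efficiently_alt
  simp only []
  split
  · rfl
  · exact pvLoop_eq _ _ _ _ 0 le_rfl
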